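-- pv_equiv track=rewrite | github.com/JoanneLongeville/AdventOfCode2023 | Day01/day01.py | find_first_and_last_digit
-- ===== SOURCE A (Python) =====
-- def find_first_and_last_digit(word_split):
--     number = []
--     for w in word_split:
--         digit = [char for char in w if char.isdigit()]
--         if digit:
--             concat_digit = digit[0] + digit[-1]
--             number.append(int(concat_digit))
--     return number
-- ===== SOURCE B (Python) =====
-- def find_first_and_last_digit(word_split):
--     # Different decomposition: find the first digit scanning forward and the
--     # last digit scanning backward, instead of materialising all digits.
--     number = []
--     for w in word_split:
--         first = next((c for c in w if c.isdigit()), None)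
--         if first is not None:
--             last = next(c for c in reversed(w) if c.isdigit())
--             number.append(int(first) * 10 + int(last))
--     return number
-- ===== Notes on version B (the rewrite author's own statement) =====
-- stated objective: alternative
-- what changed: B keeps only the first digit (forward scan) and the last digit (backward scan) of each word and combines them as int(first)*10+int(last), instead of building the full list of digit characters and int() of their concatenation.
import Mathlib
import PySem

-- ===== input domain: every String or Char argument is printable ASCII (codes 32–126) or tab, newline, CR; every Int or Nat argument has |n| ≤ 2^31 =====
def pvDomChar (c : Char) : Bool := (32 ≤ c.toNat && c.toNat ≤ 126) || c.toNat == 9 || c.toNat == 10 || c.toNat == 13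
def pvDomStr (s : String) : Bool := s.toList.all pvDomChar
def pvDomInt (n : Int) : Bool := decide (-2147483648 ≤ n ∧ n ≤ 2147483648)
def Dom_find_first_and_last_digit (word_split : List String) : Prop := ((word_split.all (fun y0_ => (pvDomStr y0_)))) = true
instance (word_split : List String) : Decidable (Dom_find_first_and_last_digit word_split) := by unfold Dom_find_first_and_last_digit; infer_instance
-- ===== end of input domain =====

-- B finds the first digit by a forward scan and the last digit by a backward scan
-- of each word, instead of collecting all digit characters into a list (alternative decomposition, same cost).
-- ===== PORT A =====
def find_first_and_last_digit (word_split : List String) : List Int :=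
  word_split.foldl (fun number w =>
    let digit := w.toList.filter (fun ch => PySem.Chars.isdigit ch)
    if h : digit ≠ [] then
      -- digit[0] + digit[-1] then int(...): a two-digit-character string, int never fails
      number ++ [(PySem.Int.ofChars? [digit.head h, digit.getLast h]).getD 0]
    else number) []

-- ===== PORT B =====
-- next((c for c in … if c.isdigit()), None)
def pvFirstDigit : List Char → Option Char
  | [] => none
  | ch :: cs => if PySem.Chars.isdigit ch then some ch else pvFirstDigit cs

def find_first_and_last_digit_alt (word_split : List String) : List Int :=
  word_split.foldl (fun number w =>
    match pvFirstDigit w.toList with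
    | none => number
    | some first =>
      match pvFirstDigit w.toList.reverse with
      | none => number   -- unreachable: a digit exists, so the backward scan finds one
      | some last =>
        number ++ [(PySem.Int.ofChars? [first]).getD 0 * 10 + (PySem.Int.ofChars? [last]).getD 0]) []

-- ===== PRECONDITION & SPEC =====
def Spec_find_first_and_last_digit (word_split : List String) (out : List Int) : Prop := out = find_first_and_last_digit_alt word_split
instance (word_split : List String) (out : List Int) : Decidable (Spec_find_first_and_last_digit word_split out) := by unfold Spec_find_first_and_last_digit; infer_instance

-- ===== CLAIM (what is proved, stated in full; the proofs are below) =====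
def Claim_equal_find_first_and_last_digit : Prop := ∀ (word_split : List String), Dom_find_first_and_last_digit word_split → Spec_find_first_and_last_digit word_split (find_first_and_last_digit word_split)

-- ===== LEMMAS AND PROOFS =====
def pvDigitChars : List Char := ['0','1','2','3','4','5','6','7','8','9']

theorem pv_char_eq_of_toNat {c d : Char} (h : c.toNat = d.toNat) : c = d :=
  Char.ext (UInt32.toNat_inj.mp h)

theorem pv_mem_digitChars (c : Char) (h : PySem.Chars.isdigit c = true) : c ∈ pvDigitChars := by
  simp [PySem.Chars.isdigit, Char.le_def, UInt32.le_iff_toNat_le] at h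
  obtain ⟨h1, h2⟩ := h
  have hn : c.toNat = 48 ∨ c.toNat = 49 ∨ c.toNat = 50 ∨ c.toNat = 51 ∨ c.toNat = 52 ∨ c.toNat = 53 ∨ c.toNat = 54 ∨ c.toNat = 55 ∨ c.toNat = 56 ∨ c.toNat = 57 := by omega
  rcases hn with h|h|h|h|h|h|h|h|h|h
  · exact (show c = '0' from pv_char_eq_of_toNat (by rw [h]; decide)) ▸ (by decide)
  · exact (show c = '1' from pv_char_eq_of_toNat (by rw [h]; decide)) ▸ (by decide)
  · exact (show c = '2' from pv_char_eq_of_toNat (by rw [h]; decide)) ▸ (by decide)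
  · exact (show c = '3' from pv_char_eq_of_toNat (by rw [h]; decide)) ▸ (by decide)
  · exact (show c = '4' from pv_char_eq_of_toNat (by rw [h]; decide)) ▸ (by decide)
  · exact (show c = '5' from pv_char_eq_of_toNat (by rw [h]; decide)) ▸ (by decide)
  · exact (show c = '6' from pv_char_eq_of_toNat (by rw [h]; decide)) ▸ (by decide)
  · exact (show c = '7' from pv_char_eq_of_toNat (by rw [h]; decide)) ▸ (by decide)
  · exact (show c = '8' from pv_char_eq_of_toNat (by rw [h]; decide)) ▸ (by decide)
  · exact (show c = '9' from pv_char_eq_of_toNat (by rw [h]; decide)) ▸ (by decide)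

theorem pv_ofChars_pair : ∀ c ∈ pvDigitChars, ∀ d ∈ pvDigitChars,
    (PySem.Int.ofChars? [c, d]).getD 0 =
      (PySem.Int.ofChars? [c]).getD 0 * 10 + (PySem.Int.ofChars? [d]).getD 0 := by
  intro c hc d hd
  fin_cases hc <;> fin_cases hd <;> decide

theorem pvFirstDigit_eq_head?_filter (cs : List Char) :
    pvFirstDigit cs = (cs.filter (fun ch => PySem.Chars.isdigit ch)).head? := by
  induction cs with
  | nil => rfl
  | cons c cs ih =>
    by_cases h : PySem.Chars.isdigit c = true
    · simp [pvFirstDigit, h]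
    · simp only [Bool.not_eq_true] at h
      simp [pvFirstDigit, h, ih]

theorem pv_step_eq (number : List Int) (w : String) :
    (let digit := w.toList.filter (fun ch => PySem.Chars.isdigit ch)
     if h : digit ≠ [] then
       number ++ [(PySem.Int.ofChars? [digit.head h, digit.getLast h]).getD 0]
     else number)
    = (match pvFirstDigit w.toList with
       | none => number
       | some first =>
         match pvFirstDigit w.toList.reverse with
         | none => number
         | some last =>
           number ++ [(PySem.Int.ofChars? [first]).getD 0 * 10 + (PySem.Int.ofChars? [last]).getD 0]) := by
  have hf := pvFirstDigit_eq_head?_filter w.toList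
  have hr := pvFirstDigit_eq_head?_filter w.toList.reverse
  rw [List.filter_reverse, List.head?_reverse] at hr
  cases hd : w.toList.filter (fun ch => PySem.Chars.isdigit ch) with
  | nil =>
    simp only [hd] at hf hr
    simp [hf]
  | cons a t =>
    have hdig : ∀ x ∈ a :: t, PySem.Chars.isdigit x = true := by
      intro x hx
      have := hd ▸ hx
      exact (List.mem_filter.mp this).2
    have hlast : (a :: t).getLast? = some ((a :: t).getLast (by simp)) := by
      simp [List.getLast?_eq_some_getLast]
    simp only [hd] at hf hr
    rw [hf, hr, hlast]
    rw [dif_pos (by simp)]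
    have := pv_ofChars_pair a (pv_mem_digitChars a (hdig a (by simp)))
      ((a :: t).getLast (by simp))
      (pv_mem_digitChars _ (hdig _ (List.getLast_mem _)))
    simp [this]

theorem pv_fold_eq (word_split : List String) :
    find_first_and_last_digit word_split = find_first_and_last_digit_alt word_split := by
  unfold find_first_and_last_digit find_first_and_last_digit_alt
  induction word_split using List.reverseRecOn with
  | nil => rfl
  | append_singleton ws w ih =>
    rw [List.foldl_append, List.foldl_append, ih]
    simp only [List.foldl_cons, List.foldl_nil]
    exact pv_step_eq _ w

-- ===== VERDICT (by name: the statement is the Claim_ definition above) =====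
theorem find_first_and_last_digit_spec : Claim_equal_find_first_and_last_digit := by
  intro word_split _
  exact pv_fold_eq word_split
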